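-- pv_equiv track=rewrite | github.com/lucymahony/Soy_expression_prediction | plot_results/plot_training_metrics.py | collect_key_data
-- ===== SOURCE A (Python) =====
-- def collect_key_data(list_of_logging_dicts, list_metrics):
--     """
--     Input list_of_logging_dicts -
--     list_metrics - list of the metrics you want to plot e.g. ['epoch', 'loss','eval_loss', 'eval_f1', 'eval_matthews_correlation']
--     """
--
--     # For each metric collect all instances of its values
--     results = {}
--
--     for metric in list_metrics:
--         values = []
--         for dict in list_of_logging_dicts:
--             for k, v in dict.items():
--                 if k == metric:
--                     values.append(dict[k])
--         results[metric] = values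
--     return results
-- ===== SOURCE B (Python) =====
-- def collect_key_data(list_of_logging_dicts, list_metrics):
--     # One pass over all dicts: pre-seed a bucket per metric, then distribute
--     # each item into its bucket, instead of rescanning every dict per metric.
--     results = {metric: [] for metric in list_metrics}
--     wanted = set(list_metrics)
--     for d in list_of_logging_dicts:
--         for k, v in d.items():
--             if k in wanted:
--                 results[k].append(v)
--     return results
-- ===== Notes on version B (the rewrite author's own statement) =====
-- stated objective: faster
-- what changed: Instead of an outer loop over metrics that rescans every dict's items per metric, B pre-seeds one empty bucket per metric and makes a single pass over the dicts, appending each item whose key is a wanted metric to its bucket.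
import Mathlib
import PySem

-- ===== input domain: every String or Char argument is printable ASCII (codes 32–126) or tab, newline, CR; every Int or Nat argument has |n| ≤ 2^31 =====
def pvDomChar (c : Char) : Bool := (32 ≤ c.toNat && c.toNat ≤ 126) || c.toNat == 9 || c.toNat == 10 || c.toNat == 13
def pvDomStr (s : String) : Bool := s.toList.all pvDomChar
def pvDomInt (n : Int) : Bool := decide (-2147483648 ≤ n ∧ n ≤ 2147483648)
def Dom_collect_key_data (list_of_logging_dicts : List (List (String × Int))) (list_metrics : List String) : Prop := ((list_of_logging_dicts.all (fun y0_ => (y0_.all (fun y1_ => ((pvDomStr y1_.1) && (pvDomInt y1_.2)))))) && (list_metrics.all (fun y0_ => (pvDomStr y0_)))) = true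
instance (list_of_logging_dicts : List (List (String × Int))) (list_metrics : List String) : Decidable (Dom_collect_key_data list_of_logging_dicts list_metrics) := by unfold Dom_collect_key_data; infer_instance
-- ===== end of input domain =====

-- B replaces A's per-metric rescan of every dict by one pre-seeded bucket per metric
-- filled in a single pass over the dicts (objective: faster, O(M+N) vs O(M*N)).

-- ===== PORT A =====
-- A transliteration of A: for each metric, scan every dict's items, appending dict[k]
-- (k came from dict.items(), so the lookup is always `some`; the `none` branch is unreachable).
def collect_key_data (list_of_logging_dicts : List (List (String × Int))) (list_metrics : List String) : List (String × List Int) :=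
  (list_metrics.foldl (fun results metric =>
      PySem.Dict.insert results metric
        (list_of_logging_dicts.foldl (fun values d0 =>
            (PySem.Dict.ofList d0).items.foldl (fun values kv =>
                if kv.1 == metric then
                  match (PySem.Dict.ofList d0).get? kv.1 with  -- dict[k]
                  | some x => values ++ [x]
                  | none => values                             -- unreachable (KeyError)
                else values) values)
          ([] : List Int)))
    PySem.Dict.empty).items

-- ===== PORT B =====
def collect_key_data_alt (list_of_logging_dicts : List (List (String × Int))) (list_metrics : List String) : List (String × List Int) :=
  let results := list_metrics.foldl (fun r m => PySem.Dict.insert r m ([] : List Int)) PySem.Dict.empty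
  let wanted := PySem.Set.ofList list_metrics
  (list_of_logging_dicts.foldl (fun r d0 =>
      (PySem.Dict.ofList d0).items.foldl (fun r kv =>
          if kv.1 ∈ wanted then PySem.Dict.modify r kv.1 ([] : List Int) (fun vs => vs ++ [kv.2]) else r) r)
    results).items

-- ===== PRECONDITION & SPEC =====
def Spec_collect_key_data (list_of_logging_dicts : List (List (String × Int))) (list_metrics : List String) (out : List (String × List Int)) : Prop := out = collect_key_data_alt list_of_logging_dicts list_metrics
instance (list_of_logging_dicts : List (List (String × Int))) (list_metrics : List String) (out : List (String × List Int)) : Decidable (Spec_collect_key_data list_of_logging_dicts list_metrics out) := by unfold Spec_collect_key_data; infer_instance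

-- ===== CLAIM (what is proved, stated in full; the proofs are below) =====
def Claim_equal_collect_key_data : Prop := ∀ (list_of_logging_dicts : List (List (String × Int))) (list_metrics : List String), Dom_collect_key_data list_of_logging_dicts list_metrics → Spec_collect_key_data list_of_logging_dicts list_metrics (collect_key_data list_of_logging_dicts list_metrics)

-- ===== LEMMAS AND PROOFS =====

-- the values collected for metric m, in traversal order
def pvVals (L : List (List (String × Int))) (m : String) : List Int :=
  L.flatMap (fun d0 => (((PySem.Dict.ofList d0).items.filter (fun kv => kv.1 == m)).map (·.2)))

-- A's inner two loops over one dict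
lemma A_inner (d0 : List (String × Int)) (m : String) :
    ∀ (l : List (String × Int)) (vs : List Int), (∀ kv ∈ l, kv ∈ (PySem.Dict.ofList d0).items) →
    l.foldl (fun values kv =>
        if kv.1 == m then
          match (PySem.Dict.ofList d0).get? kv.1 with
          | some x => values ++ [x]
          | none => values
        else values) vs
      = vs ++ ((l.filter (fun kv => kv.1 == m)).map (·.2)) := by
  intro l
  induction l with
  | nil => intro vs _; simp
  | cons kv t ih =>
    intro vs h
    have hmem : kv ∈ (PySem.Dict.ofList d0).items := h kv (by simp)
    have hget : (PySem.Dict.ofList d0).get? kv.1 = some kv.2 :=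
      PySem.Dict.get?_of_mem_items _ (by simpa using hmem) (PySem.Dict.nodup_keys_ofList d0)
    simp only [List.foldl_cons, List.filter_cons]
    by_cases hk : (kv.1 == m) = true
    · rw [if_pos hk, hget]
      rw [ih _ (fun x hx => h x (List.mem_cons_of_mem _ hx))]
      have hk' : kv.1 = m := by simpa using hk
      simp [hk']
    · rw [if_neg hk]
      rw [ih _ (fun x hx => h x (List.mem_cons_of_mem _ hx))]
      simp [hk]

lemma A_outer (L : List (List (String × Int))) (m : String) :
    ∀ (vs : List Int),
    L.foldl (fun values d0 =>
        (PySem.Dict.ofList d0).items.foldl (fun values kv =>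
            if kv.1 == m then
              match (PySem.Dict.ofList d0).get? kv.1 with
              | some x => values ++ [x]
              | none => values
            else values) values) vs
      = vs ++ pvVals L m := by
  induction L with
  | nil => intro vs; simp [pvVals]
  | cons d0 t ih =>
    intro vs
    simp only [List.foldl_cons]
    rw [A_inner d0 m _ vs (fun kv hkv => hkv), ih]
    simp [pvVals]

-- fold of inserts with a value depending on the key only
lemma getD_foldl_insert_fun (f : String → List Int) :
    ∀ (ms : List String) (r : PySem.Dict String (List Int)) (k : String) (d0 : List Int),
    (ms.foldl (fun r m => PySem.Dict.insert r m (f m)) r).getD k d0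
      = if k ∈ ms then f k else r.getD k d0 := by
  intro ms
  induction ms with
  | nil => intro r k d0; simp
  | cons m t ih =>
    intro r k d0
    simp only [List.foldl_cons]
    rw [ih]
    by_cases hk : k ∈ t
    · simp [hk]
    · rw [if_neg hk, PySem.Dict.getD_insert]
      by_cases hm : k = m
      · simp [hm]
      · simp [hm, hk]

-- B: one dict's items, effect on bucket k
lemma B_inner (S : List String) (k : String) (hk : k ∈ S) :
    ∀ (l : List (String × Int)) (r : PySem.Dict String (List Int)),
    (l.foldl (fun r kv =>
        if kv.1 ∈ S then PySem.Dict.modify r kv.1 ([] : List Int) (fun vs => vs ++ [kv.2]) else r) r).getD k []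
      = r.getD k [] ++ ((l.filter (fun kv => kv.1 == k)).map (·.2)) := by
  intro l
  induction l with
  | nil => intro r; simp
  | cons kv t ih =>
    intro r
    simp only [List.foldl_cons, List.filter_cons]
    by_cases hw : kv.1 ∈ S
    · rw [if_pos hw, ih, PySem.Dict.getD_modify]
      by_cases he : k = kv.1
      · simp [he]
      · have : (kv.1 == k) = false := by simpa using fun h => he h.symm
        simp [he, this]
    · rw [if_neg hw, ih]
      have : (kv.1 == k) = false := by
        simp only [beq_eq_false_iff_ne, ne_eq]
        rintro rfl; exact hw hk
      simp [this]

lemma B_outer (S : List String) (k : String) (hk : k ∈ S) :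
    ∀ (L : List (List (String × Int))) (r : PySem.Dict String (List Int)),
    (L.foldl (fun r d0 =>
        (PySem.Dict.ofList d0).items.foldl (fun r kv =>
            if kv.1 ∈ S then PySem.Dict.modify r kv.1 ([] : List Int) (fun vs => vs ++ [kv.2]) else r) r) r).getD k []
      = r.getD k [] ++ pvVals L k := by
  intro L
  induction L with
  | nil => intro r; simp [pvVals]
  | cons d0 t ih =>
    intro r
    simp only [List.foldl_cons]
    rw [ih, B_inner S k hk]
    simp [pvVals]

-- B: one dict's items preserve the key list when every touched key is already present
lemma B_inner_keys (S : List String) :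
    ∀ (l : List (String × Int)) (r : PySem.Dict String (List Int)), r.keys = S →
    (l.foldl (fun r kv =>
        if kv.1 ∈ S then PySem.Dict.modify r kv.1 ([] : List Int) (fun vs => vs ++ [kv.2]) else r) r).keys = S := by
  intro l
  induction l with
  | nil => intro r h; simpa
  | cons kv t ih =>
    intro r h
    simp only [List.foldl_cons]
    by_cases hw : kv.1 ∈ S
    · rw [if_pos hw]
      apply ih
      have hc : r.contains kv.1 = true := by
        rw [PySem.Dict.contains_iff_mem_keys, h]; exact hw
      rw [PySem.Dict.keys_modify, PySem.Dict.keys_insert_of_contains r _ hc]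
      exact h
    · rw [if_neg hw]; exact ih r h

lemma B_outer_keys (S : List String) :
    ∀ (L : List (List (String × Int))) (r : PySem.Dict String (List Int)), r.keys = S →
    (L.foldl (fun r d0 =>
        (PySem.Dict.ofList d0).items.foldl (fun r kv =>
            if kv.1 ∈ S then PySem.Dict.modify r kv.1 ([] : List Int) (fun vs => vs ++ [kv.2]) else r) r) r).keys = S := by
  intro L
  induction L with
  | nil => intro r h; simpa
  | cons d0 t ih =>
    intro r h
    simp only [List.foldl_cons]
    exact ih _ (B_inner_keys S _ r h)

lemma keys_seed (ms : List String) (f : String → List Int) :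
    (ms.foldl (fun r m => PySem.Dict.insert r m (f m)) PySem.Dict.empty).keys = PySem.Set.ofList ms := by
  rw [PySem.Dict.keys_foldl_insert]
  simp [PySem.Set.update_nil_left]

-- ===== VERDICT (by name: the statement is the Claim_ definition above) =====
theorem collect_key_data_spec : Claim_equal_collect_key_data := by
  intro L ms _
  unfold Spec_collect_key_data collect_key_data collect_key_data_alt
  have hstep : (fun (results : PySem.Dict String (List Int)) metric =>
      PySem.Dict.insert results metric
        (L.foldl (fun values d0 =>
            (PySem.Dict.ofList d0).items.foldl (fun values kv =>
                if kv.1 == metric then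
                  match (PySem.Dict.ofList d0).get? kv.1 with
                  | some x => values ++ [x]
                  | none => values
                else values) values)
          ([] : List Int)))
      = (fun (results : PySem.Dict String (List Int)) metric =>
          PySem.Dict.insert results metric (pvVals L metric)) := by
    funext r m
    rw [A_outer L m []]
    simp
  rw [hstep]
  set A := ms.foldl (fun r m => PySem.Dict.insert r m (pvVals L m)) PySem.Dict.empty with hAdef
  set R0 := ms.foldl (fun r m => PySem.Dict.insert r m ([] : List Int)) PySem.Dict.empty with hR0def
  set F := L.foldl (fun r d0 =>
      (PySem.Dict.ofList d0).items.foldl (fun r kv =>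
          if kv.1 ∈ PySem.Set.ofList ms then PySem.Dict.modify r kv.1 ([] : List Int) (fun vs => vs ++ [kv.2]) else r) r) R0 with hFdef
  have hAkeys : A.keys = PySem.Set.ofList ms := keys_seed ms _
  have hAnodup : A.keys.Nodup := by rw [hAkeys]; exact PySem.Set.nodup_ofList ms
  have hR0keys : R0.keys = PySem.Set.ofList ms := keys_seed ms _
  have hFkeys : F.keys = PySem.Set.ofList ms := B_outer_keys _ L R0 hR0keys
  have hFnodup : F.keys.Nodup := by rw [hFkeys]; exact PySem.Set.nodup_ofList ms
  rw [PySem.Dict.items_eq_map_keys A hAnodup ([] : List Int),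
      PySem.Dict.items_eq_map_keys F hFnodup ([] : List Int), hAkeys, hFkeys]
  apply List.map_congr_left
  intro k hkS
  have hk : k ∈ ms := (PySem.Set.mem_ofList ms k).mp hkS
  have hA : A.getD k [] = pvVals L k := by
    rw [hAdef, getD_foldl_insert_fun, if_pos hk]
  have hR0 : R0.getD k [] = [] := by
    rw [hR0def, getD_foldl_insert_fun (fun _ => ([] : List Int))]
    simp
  have hF : F.getD k [] = pvVals L k := by
    rw [hFdef, B_outer (PySem.Set.ofList ms) k hkS, hR0]
    simp
  rw [hA, hF]
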